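-- pv_equiv track=rewrite | github.com/Tarek018/TP | CesarCipher/functions.py | decrypte_caesar_code
-- ===== SOURCE A (Python) =====
-- import string
--
-- def decrypte_caesar_code(Text):
--     alphabet = []
--     # Add each letter of the alphabet to the array using a for loop
--     for letter in range(ord('A'), ord('Z') + 1):
--         alphabet.append(chr(letter))
--
--     k = 0
--     k1 = 0
--     new_file_path = "decrypted_file.txt"
--     plainText = ''
--
--
--     for k in range(26):
--         plainText = plainText + '\n***Pour k1 = '+str(k)+'***\n'
--         for k1 in range(26):
--             plainText = plainText + '\nk2='+str(k1)+'  ==>  '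
--             for char in Text:
--                 alphabet = string.ascii_lowercase
--                 char = char.lower()
--                 if char in alphabet:
--                     index = alphabet.index(char)
--                     new_index = (index - k) % 26
--                     new_index = (new_index - k1) % 26
--                     plainText = plainText + alphabet[new_index]
--                 else:
--                     plainText = plainText + char
--             k1 = k1 + 1
--         plainText = plainText + '\n------------:'
--         k=k+1
--     return plainText
-- ===== SOURCE B (Python) =====
-- import string
--
-- def decrypte_caesar_code(Text):
--     alphabet = string.ascii_lowercase
--     pos = {c: i for i, c in enumerate(alphabet)}
--     lowered = Text.lower()
--     table = [''.join(alphabet[(pos[c] - s) % 26] if c in pos else c for c in lowered)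
--              for s in range(26)]
--     parts = []
--     for k in range(26):
--         parts.append('\n***Pour k1 = ' + str(k) + '***\n')
--         for k1 in range(26):
--             parts.append('\nk2=' + str(k1) + '  ==>  ' + table[(k + k1) % 26])
--         parts.append('\n------------:')
--     return ''.join(parts)
-- ===== Notes on version B (the rewrite author's own statement) =====
-- stated objective: faster
-- what changed: Instead of re-scanning Text once per (k1,k2) pair (676 scans) with an alphabet.index lookup per character, B lowers Text once, precomputes a 26-entry table of single-shift transforms via a position dict, and assembles the output by indexing the table at (k+k1)%26, joining parts at the end.
import Mathlib
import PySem

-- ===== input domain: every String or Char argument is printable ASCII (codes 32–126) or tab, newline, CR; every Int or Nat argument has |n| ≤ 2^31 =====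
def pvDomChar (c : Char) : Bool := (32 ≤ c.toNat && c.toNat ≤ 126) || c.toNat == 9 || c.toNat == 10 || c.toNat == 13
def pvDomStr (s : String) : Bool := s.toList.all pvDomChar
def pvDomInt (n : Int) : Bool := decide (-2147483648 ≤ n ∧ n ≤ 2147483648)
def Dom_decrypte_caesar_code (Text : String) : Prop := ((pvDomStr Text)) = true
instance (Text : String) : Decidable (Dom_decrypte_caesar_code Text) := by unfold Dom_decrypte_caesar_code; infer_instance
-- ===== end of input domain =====

-- B replaces A's 676 full scans of Text by a 26-entry table of single-shift transforms
-- (total shift (k+k1)%26) built from one lowered copy of Text; objective: faster (constant factor ~26x on the text scans).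
-- A mutates nothing; equivalence is about the return value.

-- ===== PORT A =====
-- string.ascii_lowercase
def pvLowerAlpha : List Char := "abcdefghijklmnopqrstuvwxyz".toList

-- A's inner loop body: one character of Text appended to plainText
def pvAStep (k k1 : Int) (acc : List Char) (c : Char) : List Char :=
  let alphabet := pvLowerAlpha        -- alphabet = string.ascii_lowercase
  let c := PySem.Chars.lowerChar c    -- char = char.lower()
  if c ∈ alphabet then
    match PySem.List.index? alphabet c with
    | some index =>
      let new_index := PySem.Int.mod ((index : Int) - k) 26
      let new_index := PySem.Int.mod (new_index - k1) 26
      match PySem.List.pyGet? alphabet new_index with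
      | some ch => acc ++ [ch]
      | none => acc                   -- unreachable: 0 ≤ new_index < 26
    | none => acc                     -- unreachable: c ∈ alphabet
  else acc ++ [c]

def decrypte_caesar_code (Text : String) : String :=
  -- the uppercase alphabet A builds first is shadowed before use; kept as dead state
  let _alphabet := (PySem.List.pyRange 65 91 1).map (fun n => Char.ofNat n.toNat)
  String.mk ((PySem.List.pyRange 0 26 1).foldl (fun acc k =>
    let acc := acc ++ ("\n***Pour k1 = ".toList ++ PySem.Int.toChars k ++ "***\n".toList)
    let acc := (PySem.List.pyRange 0 26 1).foldl (fun acc2 k1 =>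
      let acc2 := acc2 ++ ("\nk2=".toList ++ PySem.Int.toChars k1 ++ "  ==>  ".toList)
      Text.toList.foldl (pvAStep k k1) acc2) acc
    acc ++ "\n------------:".toList) [])

-- ===== PORT B =====
-- alphabet[(pos[c] - s) % 26] if c in pos else c
def pvBChar (s : Int) (c : Char) : Char :=
  match PySem.List.index? pvLowerAlpha c with
  | some i =>
    match PySem.List.pyGet? pvLowerAlpha (PySem.Int.mod ((i : Int) - s) 26) with
    | some ch => ch
    | none => c                       -- unreachable: the index is in [0, 26)
  | none => c

def pvBRow (lowered : List Char) (s : Int) : List Char := lowered.map (pvBChar s)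

def decrypte_caesar_code_alt (Text : String) : String :=
  let lowered := PySem.Chars.lower Text.toList
  let table := (PySem.List.pyRange 0 26 1).map (pvBRow lowered)
  let parts := (PySem.List.pyRange 0 26 1).foldl (fun parts k =>
    let parts := parts ++ ["\n***Pour k1 = ".toList ++ PySem.Int.toChars k ++ "***\n".toList]
    let parts := (PySem.List.pyRange 0 26 1).foldl (fun parts k1 =>
      parts ++ ["\nk2=".toList ++ PySem.Int.toChars k1 ++ "  ==>  ".toList ++
        ((PySem.List.pyGet? table (PySem.Int.mod (k + k1) 26)).getD [])]) parts
    parts ++ ["\n------------:".toList]) ([] : List (List Char))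
  String.mk parts.flatten

-- ===== PRECONDITION & SPEC =====
def Spec_decrypte_caesar_code (Text : String) (out : String) : Prop := out = decrypte_caesar_code_alt Text
instance (Text : String) (out : String) : Decidable (Spec_decrypte_caesar_code Text out) := by unfold Spec_decrypte_caesar_code; infer_instance

-- ===== CLAIM (what is proved, stated in full; the proofs are below) =====
def Claim_equal_decrypte_caesar_code : Prop := ∀ (Text : String), Dom_decrypte_caesar_code Text → Spec_decrypte_caesar_code Text (decrypte_caesar_code Text)

-- ===== LEMMAS AND PROOFS =====

theorem pvmod26 (a : Int) : PySem.Int.mod a 26 = a % 26 := by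
  simp [PySem.Int.mod, Int.fmod_eq_emod]

theorem pv_char_eq (k k1 : Int) (acc : List Char) (c : Char) :
    pvAStep k k1 acc c =
      acc ++ [pvBChar (PySem.Int.mod (k + k1) 26) (PySem.Chars.lowerChar c)] := by
  simp only [pvAStep, pvBChar, pvmod26]
  by_cases h : PySem.Chars.lowerChar c ∈ pvLowerAlpha
  · obtain ⟨i, hi⟩ := Option.isSome_iff_exists.mp ((PySem.List.index?_isSome_iff _ _).mpr h)
    obtain ⟨hk, -, -⟩ := PySem.List.getElem_of_index?_eq_some hi
    have hi26 : i < 26 := by simpa [pvLowerAlpha] using hk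
    simp only [if_pos h, hi]
    have e1 : ((i : Int) - k) % 26 % 26 - k1 = ((i : Int) - k) % 26 - k1 := by omega
    have e2 : (((i : Int) - k) % 26 - k1) % 26 = ((i : Int) - (k + k1) % 26) % 26 := by omega
    rw [e2]
    rw [PySem.List.pyGet?_eq_some_getElem _ (by omega) (by simp [pvLowerAlpha]; omega)]
  · simp only [if_neg h, (PySem.List.index?_eq_none_iff _ _).mpr h]

theorem pv_row_eq (k k1 : Int) (acc : List Char) (cs : List Char) :
    cs.foldl (pvAStep k k1) acc =
      acc ++ pvBRow (PySem.Chars.lower cs) (PySem.Int.mod (k + k1) 26) := by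
  rw [PySem.List.foldl_congr_mem cs (pvAStep k k1)
      (fun a c => a ++ [pvBChar (PySem.Int.mod (k + k1) 26) (PySem.Chars.lowerChar c)]) acc
      (fun a x _ => pv_char_eq k k1 a x)]
  rw [PySem.List.foldl_append_singleton_eq_map
      (fun c => pvBChar (PySem.Int.mod (k + k1) 26) (PySem.Chars.lowerChar c)) cs acc]
  simp [pvBRow, PySem.Chars.lower, List.map_map]

theorem pv_table_get (lowered : List Char) (k k1 : Int) :
    (PySem.List.pyGet? ((PySem.List.pyRange 0 26 1).map (pvBRow lowered))
        (PySem.Int.mod (k + k1) 26)).getD [] =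
      pvBRow lowered (PySem.Int.mod (k + k1) 26) := by
  simp only [pvmod26]
  rw [PySem.List.pyGet?_of_nonneg _ (by omega), List.getElem?_map,
      PySem.List.getElem?_pyRange_one]
  rw [if_pos (by omega : ((k + k1) % 26).toNat < ((26 : Int) - 0).toNat)]
  simp only [Option.map_some, Option.getD_some]
  congr 1
  omega

theorem pv_flatten_flatMap {α β : Type} (l : List α) (g : α → List (List β)) :
    (l.flatMap g).flatten = l.flatMap (fun x => (g x).flatten) := by
  induction l with
  | nil => simp
  | cons x xs ih => simp [ih]

-- ===== VERDICT (by name: the statement is the Claim_ definition above) =====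
theorem decrypte_caesar_code_spec : Claim_equal_decrypte_caesar_code := by
  intro Text _
  unfold Spec_decrypte_caesar_code decrypte_caesar_code decrypte_caesar_code_alt
  simp only [pv_row_eq, pv_table_get]
  simp only [List.append_assoc, PySem.List.foldl_append_eq_flatMap, List.nil_append]
  simp only [pv_flatten_flatMap, List.flatten_append, List.flatten_cons,
    List.flatten_nil, List.append_nil, List.append_assoc]
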